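-- pv_equiv track=rewrite | github.com/krangelov/rgl-learner | rgl_learner/learn_paradigms.py | longest_variable
-- ===== SOURCE A (Python) =====
-- def longest_variable(string):
--     if type(string) != str:
--         return 0
--     thislen = 0
--     maxlen = 0
--     inside = 0
--     for s in string:
--         if inside and s != u']':
--             thislen += 1
--         elif s == u']':
--             inside = 0
--             maxlen = max(thislen, maxlen)
--         elif s == u'[':
--             inside = 1
--             thislen = 0
--     return maxlen
-- ===== SOURCE B (Python) =====
-- import re
--
-- def longest_variable(string):
--     if type(string) != str:
--         return 0
--     return max((len(m) for m in re.findall(r'\[([^]]*)\]', string)), default=0)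
-- ===== Notes on version B (the rewrite author's own statement) =====
-- stated objective: idiomatic
-- what changed: Replaced the manual inside/thislen state machine with re.findall of the pattern \[([^]]*)\] and a max over the captured group lengths (default 0).
import Mathlib
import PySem

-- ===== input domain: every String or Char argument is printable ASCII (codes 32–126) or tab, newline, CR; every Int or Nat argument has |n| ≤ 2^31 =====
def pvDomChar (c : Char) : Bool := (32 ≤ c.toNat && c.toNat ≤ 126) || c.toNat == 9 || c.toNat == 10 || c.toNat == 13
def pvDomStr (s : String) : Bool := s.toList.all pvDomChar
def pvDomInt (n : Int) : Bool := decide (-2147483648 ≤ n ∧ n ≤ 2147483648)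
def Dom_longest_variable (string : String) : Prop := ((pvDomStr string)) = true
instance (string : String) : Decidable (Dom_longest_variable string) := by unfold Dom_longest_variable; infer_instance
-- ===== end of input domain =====

-- B replaces A's manual inside/thislen state machine by collecting every bracketed run
-- (regex \[([^]]*)\]) and taking the max captured length; same return value, idiomatic.
-- (The Python `type(string) != str` guard is vacuous for a String argument.)

-- ===== PORT A =====
-- state = (thislen, maxlen, inside), branches in A's order
def pvStepA (st : Int × Int × Int) (s : Char) : Int × Int × Int :=
  if st.2.2 ≠ 0 ∧ s ≠ ']' then (st.1 + 1, st.2.1, st.2.2)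
  else if s = ']' then (st.1, max st.1 st.2.1, 0)
  else if s = '[' then (0, st.2.1, 1)
  else st

def longest_variable (string : String) : Int :=
  (string.toList.foldl pvStepA (0, 0, 0)).2.1

-- ===== PORT B =====
-- hand port of re.findall(r'\[([^]]*)\]', s): scan to a '[', capture non-']' chars,
-- a match needs a closing ']'; exact for this pattern on any string
def pvFindGroups : List Char → List (List Char)
  | [] => []
  | c :: rest =>
    if c = '[' then
      match h : rest.dropWhile (· ≠ ']') with
      | [] => []
      | _ :: tail =>
        rest.takeWhile (· ≠ ']') :: pvFindGroups tail
    else pvFindGroups rest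
termination_by l => l.length
decreasing_by
  · have h1 : (rest.dropWhile (· ≠ ']')).length ≤ rest.length := rest.length_dropWhile_le _
    rw [h] at h1
    simp at h1 ⊢
    omega
  · simp

def longest_variable_alt (string : String) : Int :=
  (pvFindGroups string.toList).foldl (fun a g => max a (g.length : Int)) 0

-- ===== PRECONDITION & SPEC =====
def Spec_longest_variable (string : String) (out : Int) : Prop := out = longest_variable_alt string
instance (string : String) (out : Int) : Decidable (Spec_longest_variable string out) := by unfold Spec_longest_variable; infer_instance

-- ===== CLAIM (what is proved, stated in full; the proofs are below) =====
def Claim_equal_longest_variable : Prop := ∀ (string : String), Dom_longest_variable string → Spec_longest_variable string (longest_variable string)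

-- ===== LEMMAS AND PROOFS =====

def pvLoopA : List Char → Int × Int × Int → Int
  | [], st => st.2.1
  | c :: cs, st => pvLoopA cs (pvStepA st c)

lemma pvLoopA_eq_foldl (cs : List Char) (st : Int × Int × Int) :
    pvLoopA cs st = (cs.foldl pvStepA st).2.1 := by
  induction cs generalizing st with
  | nil => rfl
  | cons c cs ih => simp [pvLoopA, List.foldl, ih]

def pvFmax (m : Int) (gs : List (List Char)) : Int :=
  gs.foldl (fun a g => max a (g.length : Int)) m

lemma pvInside (cs : List Char) (t m : Int) :
    pvLoopA cs (t, m, 1) =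
      (match cs.dropWhile (· ≠ ']') with
       | [] => m
       | _ :: tail =>
         pvLoopA tail (t + ((cs.takeWhile (· ≠ ']')).length : Int),
                       max (t + ((cs.takeWhile (· ≠ ']')).length : Int)) m, 0)) := by
  induction cs generalizing t with
  | nil => simp [pvLoopA]
  | cons c cs ih =>
    by_cases hc : c = ']'
    · subst hc
      simp [pvLoopA, pvStepA, List.dropWhile, List.takeWhile]
    · simp only [pvLoopA, pvStepA]
      rw [if_pos ⟨by decide, hc⟩]
      rw [ih]
      cases h : cs.dropWhile (· ≠ ']') with
      | nil =>
        simp only [ne_eq, decide_not] at h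
        simp [List.dropWhile, hc, h]
      | cons x tail =>
        simp only [ne_eq, decide_not] at h
        simp [List.dropWhile, hc, h]
        ring_nf

lemma pvFG_skip (c : Char) (cs : List Char) (hb : ¬ c = '[') :
    pvFindGroups (c :: cs) = pvFindGroups cs := by
  rw [pvFindGroups]; simp [hb]

lemma pvFG_open_nil (cs : List Char) (h : cs.dropWhile (· ≠ ']') = []) :
    pvFindGroups ('[' :: cs) = [] := by
  rw [pvFindGroups, if_pos rfl]
  split
  · rfl
  · rename_i head tl heq
    rw [h] at heq
    cases heq

lemma pvFG_open_cons (cs : List Char) (x : Char) (tail : List Char)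
    (h : cs.dropWhile (· ≠ ']') = x :: tail) :
    pvFindGroups ('[' :: cs) = cs.takeWhile (· ≠ ']') :: pvFindGroups tail := by
  rw [pvFindGroups, if_pos rfl]
  split
  · rename_i heq
    rw [h] at heq
    cases heq
  · rename_i head tl heq
    rw [h] at heq
    injection heq with h1 h2
    subst h2
    rfl

lemma pvOutside : ∀ (n : ℕ) (cs : List Char), cs.length ≤ n → ∀ (t m : Int), t ≤ m →
    pvLoopA cs (t, m, 0) = pvFmax m (pvFindGroups cs) := by
  intro n
  induction n with
  | zero =>
    intro cs hlen t m htm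
    have : cs = [] := List.length_eq_zero_iff.mp (Nat.le_zero.mp hlen)
    subst this
    simp [pvLoopA, pvFindGroups, pvFmax]
  | succ n ih =>
    intro cs hlen t m htm
    cases cs with
    | nil => simp [pvLoopA, pvFindGroups, pvFmax]
    | cons c cs =>
      simp only [List.length_cons, Nat.succ_le_succ_iff] at hlen
      by_cases hb : c = '['
      · subst hb
        have hst : pvStepA (t, m, 0) '[' = (0, m, 1) := by simp [pvStepA]
        simp only [pvLoopA, hst]
        rw [pvInside]
        cases h : cs.dropWhile (· ≠ ']') with
        | nil => rw [pvFG_open_nil cs h]; simp [pvFmax]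
        | cons x tail =>
          have htail : tail.length ≤ n := by
            have h1 : (cs.dropWhile (· ≠ ']')).length ≤ cs.length :=
              cs.length_dropWhile_le _
            rw [h] at h1
            simp at h1
            omega
          have hle : (0 : Int) + ((cs.takeWhile (· ≠ ']')).length : Int)
              ≤ max ((0 : Int) + ((cs.takeWhile (· ≠ ']')).length : Int)) m :=
            le_max_left _ _
          rw [pvFG_open_cons cs x tail h]
          dsimp only
          rw [ih tail htail _ _ hle]
          simp [pvFmax, max_comm]
      · by_cases hc : c = ']'
        · subst hc
          have hst : pvStepA (t, m, 0) ']' = (t, max t m, 0) := by simp [pvStepA]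
          simp only [pvLoopA, hst]
          rw [max_eq_right htm]
          rw [ih cs hlen t m htm]
          rw [pvFG_skip _ _ (by decide)]
        · have hst : pvStepA (t, m, 0) c = (t, m, 0) := by simp [pvStepA, hc, hb]
          simp only [pvLoopA, hst]
          rw [ih cs hlen t m htm]
          rw [pvFG_skip _ _ hb]

-- ===== VERDICT (by name: the statement is the Claim_ definition above) =====
theorem longest_variable_spec : Claim_equal_longest_variable := by
  intro s _
  unfold Spec_longest_variable longest_variable longest_variable_alt
  rw [← pvLoopA_eq_foldl]
  exact pvOutside s.toList.length s.toList le_rfl 0 0 le_rfl
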